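-- pv_equiv track=rewrite | github.com/kroma-network/eco-contract-libs | scripts/lib/math_utils.py | generate_possible_a
-- ===== SOURCE A (Python) =====
-- def generate_possible_a(m):
--     factors = set()
--     num = m
--     i = 2
--     while i * i <= num:
--         if num % i:
--             i += 1
--         else:
--             num //= i
--             factors.add(i)
--     if num > 1:
--         factors.add(num)
--
--     possible_a = [a for a in range(1, m) if all((a - 1) % factor == 0 for factor in factors)]
--     return possible_a
-- ===== SOURCE B (Python) =====
-- def generate_possible_a(m):
--     # radical = product of distinct prime factors of m
--     rad = 1
--     num = m
--     p = 2
--     while p * p <= num: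
--         if num % p == 0:
--             rad *= p
--             while num % p == 0:
--                 num //= p
--         p += 1
--     if num > 1:
--         rad *= num
--     return list(range(1, m, rad))
-- ===== Notes on version B (the rewrite author's own statement) =====
-- stated objective: faster
-- what changed: Instead of testing every candidate in range(1, m) against each prime factor, B computes the radical (product of the distinct prime factors, stripping each prime's powers during trial division) once and emits the qualifying candidates directly as the stepped range(1, m, rad).
import Mathlib
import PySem

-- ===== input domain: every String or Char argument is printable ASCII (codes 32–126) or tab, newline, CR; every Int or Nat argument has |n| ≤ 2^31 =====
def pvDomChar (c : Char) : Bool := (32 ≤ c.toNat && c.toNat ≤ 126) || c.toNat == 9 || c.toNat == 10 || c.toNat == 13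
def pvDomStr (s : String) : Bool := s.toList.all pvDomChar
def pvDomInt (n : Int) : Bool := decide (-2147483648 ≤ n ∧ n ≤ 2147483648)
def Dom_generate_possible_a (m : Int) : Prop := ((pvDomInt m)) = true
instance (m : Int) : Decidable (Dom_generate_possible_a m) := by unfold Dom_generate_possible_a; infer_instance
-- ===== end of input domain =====

-- B replaces A's per-candidate divisibility filter over range(1, m) by computing the radical
-- (product of distinct prime factors) once and emitting the arithmetic progression with step rad via a stepped range.


-- ===== PORT A =====
-- termination facts for the while-loops, named so the definitions stay small
theorem pv_two_le_succ (i : Int) (hi : 2 ≤ i) : 2 ≤ i + 1 := le_trans hi (Int.le.intro 1 rfl)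

-- the termination lemmas below are written by hand (no big automation proof terms)
theorem pv_le_sq (i : Int) (hi : 2 ≤ i) : i ≤ i * i :=
  le_mul_of_one_le_left (le_trans zero_le_two hi) (le_trans one_le_two hi)

theorem pv_sq_pos (i : Int) (hi : 2 ≤ i) : (0:Int) < i * i :=
  mul_pos (lt_of_lt_of_le zero_lt_two hi) (lt_of_lt_of_le zero_lt_two hi)

theorem pv_ediv_lt_self (a b : Int) (ha : 0 < a) (hb : 1 < b) : a / b < a :=
  Int.ediv_lt_of_lt_mul (lt_trans zero_lt_one hb) (lt_mul_of_one_lt_right ha hb)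

theorem factLoopA_dec1 (num i : Int) (hi : 2 ≤ i) (hg : i * i ≤ num) :
    2 * num.toNat + (num.toNat + 1 - (i + 1).toNat) < 2 * num.toNat + (num.toNat + 1 - i.toNat) := by
  have hiT : i.toNat ≤ num.toNat := Int.toNat_le_toNat (le_trans (pv_le_sq i hi) hg)
  rw [Int.toNat_add (le_trans zero_le_two hi) zero_le_one, Int.toNat_one]
  exact Nat.add_lt_add_left
    (Nat.sub_lt_sub_left (Nat.lt_succ_of_le hiT) (Nat.lt_succ_of_le (le_refl _))) _

theorem factLoopA_dec2 (num i : Int) (hi : 2 ≤ i) (hg : i * i ≤ num) :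
    2 * (PySem.Int.floordiv num i).toNat + ((PySem.Int.floordiv num i).toNat + 1 - i.toNat)
      < 2 * num.toNat + (num.toNat + 1 - i.toNat) := by
  have hnum0 : (0:Int) < num := lt_of_lt_of_le (pv_sq_pos i hi) hg
  have hqlt : num / i < num := pv_ediv_lt_self num i hnum0 (lt_of_lt_of_le one_lt_two hi)
  rw [PySem.Int.floordiv_eq_ediv_of_pos (lt_of_lt_of_le zero_lt_two hi)]
  have hT : (num / i).toNat < num.toNat := (Int.toNat_lt_toNat hnum0).mpr hqlt
  exact Nat.add_lt_add_of_lt_of_le ((Nat.mul_lt_mul_left two_pos).mpr hT)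
    (Nat.sub_le_sub_right (Nat.add_le_add_right (Nat.le_of_lt hT) 1) _)

-- trial-division while-loop of A: state (num, i, factors); the hypothesis 2 ≤ i only carries
-- the termination invariant (i starts at 2 and only grows) and does not affect the computation
def factLoopA (num i : Int) (F : PySem.Set Int) (hi : 2 ≤ i) : Int × PySem.Set Int :=
  if hg : i * i ≤ num then
    if PySem.Int.mod num i ≠ 0 then
      factLoopA num (i + 1) F (pv_two_le_succ i hi)
    else
      factLoopA (PySem.Int.floordiv num i) i (PySem.Set.add F i) hi
  else (num, F)
termination_by (2 * num.toNat + (num.toNat + 1 - i.toNat))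
decreasing_by
  · exact factLoopA_dec1 num i hi hg
  · exact factLoopA_dec2 num i hi hg

def generate_possible_a (m : Int) : List Int :=
  let r := factLoopA m 2 PySem.Set.empty (le_refl 2)
  let factors := if r.1 > 1 then PySem.Set.add r.2 r.1 else r.2
  (PySem.List.pyRange 1 m 1).filter
    (fun a => factors.all (fun factor => PySem.Int.mod (a - 1) factor == 0))

-- ===== PORT B =====
theorem stripP_hn (num p : Int) (hp : 2 ≤ p) (hn : 1 ≤ num)
    (hd : PySem.Int.mod num p = 0) : 1 ≤ PySem.Int.floordiv num p := by
  have hp0 : (0:Int) < p := lt_of_lt_of_le zero_lt_two hp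
  have hle : p ≤ num :=
    Int.le_of_dvd (lt_of_lt_of_le zero_lt_one hn) ((PySem.Int.mod_eq_zero_iff_dvd num p).mp hd)
  rw [PySem.Int.floordiv_eq_ediv_of_pos hp0]
  exact (Int.le_ediv_iff_mul_le hp0).mpr (le_of_eq_of_le (one_mul p) hle)

theorem stripP_dec (num p : Int) (hp : 2 ≤ p) (hn : 1 ≤ num)
    (hd : PySem.Int.mod num p = 0) : (PySem.Int.floordiv num p).toNat < num.toNat := by
  have hn0 : (0:Int) < num := lt_of_lt_of_le zero_lt_one hn
  rw [PySem.Int.floordiv_eq_ediv_of_pos (lt_of_lt_of_le zero_lt_two hp)]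
  exact (Int.toNat_lt_toNat hn0).mpr (pv_ediv_lt_self num p hn0 (lt_of_lt_of_le one_lt_two hp))

-- inner while of B: strip all powers of p out of num (entered only with 1 ≤ num, 2 ≤ p)
def stripP (num p : Int) (hp : 2 ≤ p) (hn : 1 ≤ num) : Int :=
  if hd : PySem.Int.mod num p = 0 then
    stripP (PySem.Int.floordiv num p) p hp (stripP_hn num p hp hn hd)
  else num
termination_by num.toNat
decreasing_by exact stripP_dec num p hp hn hd

-- cited by radLoop's decreasing_by: stripping powers never increases num
theorem stripP_le (num p : Int) (hp : 2 ≤ p) (hn : 1 ≤ num) : stripP num p hp hn ≤ num := by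
  fun_induction stripP num p hp hn with
  | case1 num hn hd ih =>
    refine le_trans ih ?_
    rw [PySem.Int.floordiv_eq_ediv_of_pos (lt_of_lt_of_le zero_lt_two hp)]
    exact Int.ediv_le_self _ (le_trans zero_le_one hn)
  | case2 => exact le_refl _

theorem radLoop_hn (num p : Int) (hp : 2 ≤ p) (hg : p * p ≤ num) : 1 ≤ num :=
  le_trans (le_trans one_le_two (le_trans hp (pv_le_sq p hp))) hg

theorem radLoop_dec1 (num p : Int) (hp : 2 ≤ p) (hg : p * p ≤ num) :
    (stripP num p hp (radLoop_hn num p hp hg)).toNat + 1 - (p + 1).toNat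
      < num.toNat + 1 - p.toNat := by
  have hpT : p.toNat ≤ num.toNat := Int.toNat_le_toNat (le_trans (pv_le_sq p hp) hg)
  have hsT : (stripP num p hp (radLoop_hn num p hp hg)).toNat ≤ num.toNat :=
    Int.toNat_le_toNat (stripP_le num p hp (radLoop_hn num p hp hg))
  rw [Int.toNat_add (le_trans zero_le_two hp) zero_le_one, Int.toNat_one]
  exact lt_of_le_of_lt (Nat.sub_le_sub_right (Nat.add_le_add_right hsT 1) _)
    (Nat.sub_lt_sub_left (Nat.lt_succ_of_le hpT) (Nat.lt_succ_of_le (le_refl _)))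

theorem radLoop_dec2 (num p : Int) (hp : 2 ≤ p) (hg : p * p ≤ num) :
    num.toNat + 1 - (p + 1).toNat < num.toNat + 1 - p.toNat := by
  have hpT : p.toNat ≤ num.toNat := Int.toNat_le_toNat (le_trans (pv_le_sq p hp) hg)
  rw [Int.toNat_add (le_trans zero_le_two hp) zero_le_one, Int.toNat_one]
  exact Nat.sub_lt_sub_left (Nat.lt_succ_of_le hpT) (Nat.lt_succ_of_le (le_refl _))

-- outer while of B over candidate factors p
def radLoop (rad num p : Int) (hp : 2 ≤ p) : Int × Int :=
  if hg : p * p ≤ num then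
    if hd : PySem.Int.mod num p = 0 then
      radLoop (rad * p) (stripP num p hp (radLoop_hn num p hp hg)) (p + 1) (pv_two_le_succ p hp)
    else
      radLoop rad num (p + 1) (pv_two_le_succ p hp)
  else (rad, num)
termination_by (num.toNat + 1 - p.toNat)
decreasing_by
  · exact radLoop_dec1 num p hp hg
  · exact radLoop_dec2 num p hp hg

def generate_possible_a_alt (m : Int) : List Int :=
  let r := radLoop 1 m 2 (le_refl 2)
  let rad := if r.2 > 1 then r.1 * r.2 else r.1
  PySem.List.pyRange 1 m rad

-- ===== PRECONDITION & SPEC =====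
def Spec_generate_possible_a (m : Int) (out : List Int) : Prop := out = generate_possible_a_alt m
instance (m : Int) (out : List Int) : Decidable (Spec_generate_possible_a m out) := by unfold Spec_generate_possible_a; infer_instance

-- ===== CLAIM (what is proved, stated in full; the proofs are below) =====
def Claim_equal_generate_possible_a : Prop := ∀ (m : Int), Dom_generate_possible_a m → Spec_generate_possible_a m (generate_possible_a m)

-- ===== LEMMAS AND PROOFS =====

-- cast bridge: a Nat divides a nonnegative Int iff it divides its toNat
theorem pv_cast_dvd (q : ℕ) (z : Int) (hz : 0 ≤ z) : ((q : Int) ∣ z ↔ q ∣ z.toNat) := by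
  rw [Int.natCast_dvd]
  have h : z.natAbs = z.toNat := by omega
  rw [h]

-- a number with no divisor in [2, i) and below i*i is (as a Nat) prime
theorem prime_of_no_small_divisors (num i : Int) (hi : 2 ≤ i) (h1 : 1 < num) (h2 : num < i * i)
    (hmin : ∀ j : Int, 2 ≤ j → j < i → ¬ j ∣ num) : num.toNat.Prime := by
  by_contra hnp
  set n := num.toNat with hn
  have hnum : (n : Int) = num := Int.toNat_of_nonneg (by omega)
  have hn1 : 1 < n := by omega
  have hp : n.minFac.Prime := Nat.minFac_prime (by omega)
  have hdvd : n.minFac ∣ n := Nat.minFac_dvd n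
  have hsq : n.minFac ^ 2 ≤ n := Nat.minFac_sq_le_self (by omega) hnp
  have hdvdZ : (n.minFac : Int) ∣ num := by
    rw [← hnum]; exact_mod_cast hdvd
  refine hmin (n.minFac) (by exact_mod_cast hp.two_le) ?_ hdvdZ
  -- minFac < i since minFac^2 ≤ n < i*i
  by_contra hge
  push Not at hge
  have hmul : i * i ≤ (n.minFac : Int) * (n.minFac : Int) :=
    mul_le_mul hge hge (by omega) (by positivity)
  have hsq' : ((n.minFac ^ 2 : ℕ) : Int) ≤ (n : Int) := by exact_mod_cast hsq
  push_cast at hsq'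
  rw [pow_two] at hsq'
  linarith [hnum ▸ hsq']

-- the smallest divisor ≥ 2 of num is prime
theorem small_prime (p num : Int) (hp : 2 ≤ p) (hdvd : p ∣ num) (_hn : 1 ≤ num)
    (hmin : ∀ j : Int, 2 ≤ j → j < p → ¬ j ∣ num) : p.toNat.Prime := by
  rw [Nat.prime_def_lt]
  constructor
  · omega
  · intro d hd hddvd
    by_contra hd1
    have hd2 : 2 ≤ d := by
      rcases Nat.eq_zero_or_pos d with h0 | h1
      · subst h0; simp at hddvd; omega
      · omega
    have : (d : Int) ∣ p := by
      have : (d : Int) ∣ (p.toNat : Int) := by exact_mod_cast hddvd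
      rwa [Int.toNat_of_nonneg (by omega)] at this
    exact hmin d (by exact_mod_cast hd2) (by rw [← Int.toNat_of_nonneg (show (0:Int) ≤ p by omega)]; exact_mod_cast hd) (this.trans hdvd)

-- characterisation of A's factor set (loop + the trailing 'if num > 1' add)
theorem factLoopA_spec (num i : Int) (F : PySem.Set Int) (hi : 2 ≤ i) (hn : 1 ≤ num)
    (hmin : ∀ j : Int, 2 ≤ j → j < i → ¬ j ∣ num) (x : Int) :
    (x ∈ (if (factLoopA num i F hi).1 > 1
            then PySem.Set.add (factLoopA num i F hi).2 (factLoopA num i F hi).1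
            else (factLoopA num i F hi).2))
      ↔ (x ∈ F ∨ ∃ q : ℕ, q.Prime ∧ (q : Int) ∣ num ∧ x = (q : Int)) := by
  fun_induction factLoopA num i F hi with
  | case1 num i F hi hg hnd ih =>
    have hmin' : ∀ j : Int, 2 ≤ j → j < i + 1 → ¬ j ∣ num := by
      intro j hj2 hji hjd
      rcases lt_or_eq_of_le (by omega : j ≤ i) with h | h
      · exact hmin j hj2 h hjd
      · subst h; exact hnd ((PySem.Int.mod_eq_zero_iff_dvd num j).mpr hjd)
    rw [ih hn hmin']
  | case2 num i F hi hg hnd ih =>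
    have hdvd : i ∣ num := by
      by_contra hc
      exact hnd (by simpa using fun h => hc ((PySem.Int.mod_eq_zero_iff_dvd num i).mp h))
    have hiprime : i.toNat.Prime := small_prime i num hi hdvd hn hmin
    have hfd : PySem.Int.floordiv num i = num / i := PySem.Int.floordiv_eq_ediv_of_pos (by omega)
    have hnum_eq : num = i * (num / i) := by
      conv_lhs => rw [← Int.ediv_mul_cancel hdvd]; rw [mul_comm]
    have hq1 : 1 ≤ PySem.Int.floordiv num i := by
      rw [hfd]
      exact (Int.le_ediv_iff_mul_le (by omega)).mpr (by nlinarith [Int.le_of_dvd (by omega) hdvd])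
    have hqd : PySem.Int.floordiv num i ∣ num := by rw [hfd]; exact Int.ediv_dvd_of_dvd hdvd
    have hit : ((i.toNat : ℕ) : Int) = i := Int.toNat_of_nonneg (by omega)
    have hmin' : ∀ j : Int, 2 ≤ j → j < i → ¬ j ∣ PySem.Int.floordiv num i := by
      intro j hj2 hji hjd
      exact hmin j hj2 hji (hjd.trans hqd)
    rw [ih hq1 hmin']
    constructor
    · rintro (h | ⟨q, hq, hqdvd, hx⟩)
      · rcases (PySem.Set.mem_add F i x).mp h with h | h
        · exact Or.inl h
        · exact Or.inr ⟨i.toNat, hiprime, by rw [hit]; exact hdvd, by rw [hit]; exact h⟩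
      · exact Or.inr ⟨q, hq, hqdvd.trans hqd, hx⟩
    · rintro (h | ⟨q, hq, hqdvd, hx⟩)
      · exact Or.inl ((PySem.Set.mem_add F i x).mpr (Or.inl h))
      · by_cases hqi : (q : Int) = i
        · exact Or.inl ((PySem.Set.mem_add F i x).mpr (Or.inr (hx.trans hqi)))
        · refine Or.inr ⟨q, hq, ?_, hx⟩
          have hqd2 := hqdvd
          rw [hnum_eq] at hqd2
          rcases Int.Prime.dvd_mul' hq hqd2 with h | h
          · exfalso
            have hqi2 : q ∣ i.toNat := (pv_cast_dvd q i (by omega)).mp h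
            have := (Nat.prime_dvd_prime_iff_eq hq hiprime).mp hqi2
            exact hqi (by rw [this, hit])
          · rwa [hfd]
  | case3 num i F hi hg =>
    push Not at hg
    rcases eq_or_lt_of_le hn with h1 | h1
    · -- num = 1
      simp only [← h1, if_neg (by omega : ¬ ((1:Int) > 1))]
      constructor
      · exact Or.inl
      · rintro (h | ⟨q, hq, hqdvd, hx⟩)
        · exact h
        · exfalso
          have : (q : Int) ≤ 1 := Int.le_of_dvd (by omega) hqdvd
          have := hq.two_le
          omega
    · -- num is prime here
      have hprime : num.toNat.Prime := prime_of_no_small_divisors num i hi h1 hg hmin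
      have hnum : ((num.toNat : ℕ) : Int) = num := Int.toNat_of_nonneg (by omega)
      simp only [if_pos (by omega : num > 1)]
      rw [PySem.Set.mem_add]
      constructor
      · rintro (h | h)
        · exact Or.inl h
        · exact Or.inr ⟨num.toNat, hprime, by rw [hnum], by rw [hnum]; exact h⟩
      · rintro (h | ⟨q, hq, hqdvd, hx⟩)
        · exact Or.inl h
        · refine Or.inr ?_
          have hqn : q ∣ num.toNat := (pv_cast_dvd q num (by omega)).mp hqdvd
          have := (Nat.prime_dvd_prime_iff_eq hq hprime).mp hqn
          rw [hx, this, hnum]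

-- stripP returns a divisor of its input
theorem stripP_dvd (num p : Int) (hp : 2 ≤ p) (hn : 1 ≤ num) : stripP num p hp hn ∣ num := by
  fun_induction stripP num p hp hn with
  | case1 num hn hd ih =>
    have hdvd : p ∣ num := (PySem.Int.mod_eq_zero_iff_dvd num p).mp hd
    refine ih.trans ?_
    rw [PySem.Int.floordiv_eq_ediv_of_pos (by omega)]
    exact Int.ediv_dvd_of_dvd hdvd
  | case2 => exact dvd_refl _

theorem stripP_pos (num p : Int) (hp : 2 ≤ p) (hn : 1 ≤ num) : 1 ≤ stripP num p hp hn := by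
  fun_induction stripP num p hp hn with
  | case1 num hn hd ih => exact ih
  | case2 num hn hd => exact hn

-- p does not divide the result of stripping powers of p
theorem stripP_not_dvd (num p : Int) (hp : 2 ≤ p) (hn : 1 ≤ num) : ¬ p ∣ stripP num p hp hn := by
  fun_induction stripP num p hp hn with
  | case1 num hn hd ih => exact ih
  | case2 num hn hd =>
    intro hc
    exact hd ((PySem.Int.mod_eq_zero_iff_dvd num p).mpr hc)

-- a prime not dividing p divides the stripped number iff it divides the original
theorem stripP_dvd_iff (num p : Int) (hp : 2 ≤ p) (hn : 1 ≤ num) (q : ℕ) (hq : q.Prime)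
    (hqp : ¬ (q : Int) ∣ p) : ((q : Int) ∣ stripP num p hp hn ↔ (q : Int) ∣ num) := by
  fun_induction stripP num p hp hn with
  | case1 num hn hd ih =>
    have hdvd : p ∣ num := (PySem.Int.mod_eq_zero_iff_dvd num p).mp hd
    rw [ih, PySem.Int.floordiv_eq_ediv_of_pos (by omega)]
    constructor
    · intro h
      exact h.trans (Int.ediv_dvd_of_dvd hdvd)
    · intro h
      have hnum_eq : num = p * (num / p) := by
        conv_lhs => rw [← Int.ediv_mul_cancel hdvd]; rw [mul_comm]
      rw [hnum_eq] at h
      rcases Int.Prime.dvd_mul' hq h with h | h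
      · exact absurd h hqp
      · exact h
  | case2 => exact Iff.rfl

-- characterisation of B's radical (loop + the trailing 'if num > 1' multiply)
theorem radLoop_spec (rad num p : Int) (hp : 2 ≤ p) (hn : 1 ≤ num)
    (hmin : ∀ j : Int, 2 ≤ j → j < p → ¬ j ∣ num) :
    (if (radLoop rad num p hp).2 > 1
       then (radLoop rad num p hp).1 * (radLoop rad num p hp).2
       else (radLoop rad num p hp).1)
      = rad * ∏ q ∈ num.toNat.primeFactors, (q : Int) := by
  fun_induction radLoop rad num p hp with
  | case1 rad num p hp hg hd ih =>
    have hdvd : p ∣ num := (PySem.Int.mod_eq_zero_iff_dvd num p).mp hd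
    have hpprime : p.toNat.Prime := small_prime p num hp hdvd hn hmin
    have hps : 1 ≤ num := hn
    set num' := stripP num p hp (by nlinarith) with hnum'
    have hn' : 1 ≤ num' := stripP_pos _ _ _ _
    rw [ih hn' ?_]
    · -- rad * p * ∏ primeFactors(num') = rad * ∏ primeFactors(num)
      have hkey : num'.toNat.primeFactors = num.toNat.primeFactors.erase p.toNat := by
        ext q
        simp only [Nat.mem_primeFactors, Finset.mem_erase]
        constructor
        · rintro ⟨hq, hqdvd, hne⟩
          have hqZ : (q : Int) ∣ num' := (pv_cast_dvd q num' (by omega)).mpr hqdvd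
          have hqp : ¬ (q : Int) ∣ p := by
            intro hc
            have : q ∣ p.toNat := (pv_cast_dvd q p (by omega)).mp hc
            have := (Nat.prime_dvd_prime_iff_eq hq hpprime).mp this
            subst this
            exact stripP_not_dvd num p hp (by nlinarith)
              (by rwa [Int.toNat_of_nonneg (by omega)] at hqZ)
          have : (q : Int) ∣ num := (stripP_dvd_iff num p hp (by nlinarith) q hq hqp).mp hqZ
          refine ⟨?_, hq, ?_, by omega⟩
          · intro hc
            subst hc
            exact hqp (by rw [Int.toNat_of_nonneg (by omega)])
          · exact (pv_cast_dvd q num (by omega)).mp this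
        · rintro ⟨hne, hq, hqdvd, _⟩
          have hqZ : (q : Int) ∣ num := (pv_cast_dvd q num (by omega)).mpr hqdvd
          have hqp : ¬ (q : Int) ∣ p := by
            intro hc
            have : q ∣ p.toNat := (pv_cast_dvd q p (by omega)).mp hc
            exact hne ((Nat.prime_dvd_prime_iff_eq hq hpprime).mp this)
          have : (q : Int) ∣ num' := (stripP_dvd_iff num p hp (by nlinarith) q hq hqp).mpr hqZ
          refine ⟨hq, ?_, by omega⟩
          exact (pv_cast_dvd q num' (by omega)).mp this
      have hpmem : p.toNat ∈ num.toNat.primeFactors := by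
        rw [Nat.mem_primeFactors]
        refine ⟨hpprime, ?_, by omega⟩
        have : (p.toNat : Int) ∣ num := by rwa [Int.toNat_of_nonneg (by omega)]
        exact (pv_cast_dvd p.toNat num (by omega)).mp this
      rw [hkey, ← Finset.mul_prod_erase num.toNat.primeFactors (fun q => (q : Int)) hpmem]
      rw [Int.toNat_of_nonneg (by omega : (0:Int) ≤ p)]
      ring
    · intro j hj2 hji hjd
      rcases lt_or_eq_of_le (by omega : j ≤ p) with h | h
      · refine hmin j hj2 h (hjd.trans ?_)
        exact stripP_dvd num p hp (by nlinarith)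
      · exact stripP_not_dvd num p hp (by nlinarith) (h ▸ hjd)
  | case2 rad num p hp hg hd ih =>
    refine ih hn ?_
    intro j hj2 hji hjd
    rcases lt_or_eq_of_le (by omega : j ≤ p) with h | h
    · exact hmin j hj2 h hjd
    · subst h
      exact hd ((PySem.Int.mod_eq_zero_iff_dvd num j).mpr hjd)
  | case3 rad num p hp hg =>
    push Not at hg
    rcases eq_or_lt_of_le hn with h1 | h1
    · simp only [← h1]
      norm_num
    · have hprime : num.toNat.Prime := prime_of_no_small_divisors num p hp h1 hg hmin
      have hpf : num.toNat.primeFactors = {num.toNat} := Nat.Prime.primeFactors hprime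
      simp only [if_pos (by omega : num > 1), hpf, Finset.prod_singleton,
        Int.toNat_of_nonneg (by omega : (0:Int) ≤ num)]

-- primes dividing z all together iff their product divides z
theorem prod_primes_dvd_iff (S : Finset ℕ) (hS : ∀ q ∈ S, q.Prime) (z : Int) :
    ((∏ q ∈ S, (q : Int)) ∣ z) ↔ ∀ q ∈ S, (q : Int) ∣ z := by
  constructor
  · intro h q hq
    exact (Finset.dvd_prod_of_mem (fun q : ℕ => (q : Int)) hq).trans h
  · intro h
    have : ((∏ q ∈ S, q : ℕ) : Int) ∣ z := by
      rw [Int.natCast_dvd]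
      refine Finset.prod_primes_dvd z.natAbs (fun q hq => (hS q hq).prime) ?_
      intro q hq
      have := h q hq
      rwa [Int.natCast_dvd] at this
    rwa [Nat.cast_prod] at this

-- ===== VERDICT (by name: the statement is the Claim_ definition above) =====
theorem generate_possible_a_spec : Claim_equal_generate_possible_a := by
  intro m _
  unfold Spec_generate_possible_a generate_possible_a generate_possible_a_alt
  by_cases hm : m ≤ 1
  · -- both sides are the empty list
    rw [radLoop]
    simp only [dif_neg (by omega : ¬ (2 * 2 : Int) ≤ m)]
    simp only [PySem.List.pyRange_one_eq_nil hm, List.filter_nil]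
    by_cases h1 : m > 1
    · omega
    · simp only [if_neg h1]
      exact (PySem.List.pyRange_one_eq_nil hm).symm
  · push Not at hm
    set S := m.toNat.primeFactors with hS
    have hSprime : ∀ q ∈ S, q.Prime := fun q hq => (Nat.mem_primeFactors.mp hq).1
    -- B's radical
    have hrad : (if (radLoop 1 m 2 (by omega)).2 > 1
         then (radLoop 1 m 2 (by omega)).1 * (radLoop 1 m 2 (by omega)).2
         else (radLoop 1 m 2 (by omega)).1) = ∏ q ∈ S, (q : Int) := by
      rw [radLoop_spec 1 m 2 (by omega) (by omega) (by intro j h1 h2; omega), one_mul]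
    set rad := (if (radLoop 1 m 2 (by omega)).2 > 1
         then (radLoop 1 m 2 (by omega)).1 * (radLoop 1 m 2 (by omega)).2
         else (radLoop 1 m 2 (by omega)).1) with hraddef
    have hradpos : 0 < rad := by
      rw [hrad]
      exact Finset.prod_pos (fun q hq => by exact_mod_cast (hSprime q hq).pos)
    -- A's factor set
    have hfact := factLoopA_spec m 2 PySem.Set.empty (by omega) (by omega)
      (by intro j h1 h2; omega)
    set factors := (if (factLoopA m 2 PySem.Set.empty (by omega)).1 > 1
        then PySem.Set.add (factLoopA m 2 PySem.Set.empty (by omega)).2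
               (factLoopA m 2 PySem.Set.empty (by omega)).1
        else (factLoopA m 2 PySem.Set.empty (by omega)).2) with hfactdef
    have hmem : ∀ x : Int,
        (x ∈ (PySem.List.pyRange 1 m 1).filter
          (fun a => factors.all (fun factor => PySem.Int.mod (a - 1) factor == 0)))
        ↔ x ∈ PySem.List.pyRange 1 m rad := by
      intro x
      rw [List.mem_filter, PySem.List.mem_pyRange_iff_of_pos hradpos, PySem.List.mem_pyRange_one]
      constructor
      · rintro ⟨⟨hx1, hx2⟩, hall⟩
        refine ⟨hx1, hx2, ?_⟩
        rw [hrad, prod_primes_dvd_iff S hSprime]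
        intro q hq
        have hxq : (q : Int) ∈ factors := by
          rw [hfact]
          refine Or.inr ⟨q, hSprime q hq, ?_, rfl⟩
          exact (pv_cast_dvd q m (by omega)).mpr (Nat.mem_primeFactors.mp hq).2.1
        have := List.all_eq_true.mp hall _ hxq
        simpa [PySem.Int.mod_eq_zero_iff_dvd] using this
      · rintro ⟨hx1, hx2, hdvd⟩
        refine ⟨⟨hx1, hx2⟩, ?_⟩
        rw [List.all_eq_true]
        intro f hf
        rw [hfact] at hf
        rcases hf with h | ⟨q, hq, hqdvd, hx⟩
        · exact absurd h (by simp [PySem.Set.empty])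
        · subst hx
          have hqS : q ∈ S := by
            rw [hS, Nat.mem_primeFactors]
            refine ⟨hq, ?_, by omega⟩
            exact (pv_cast_dvd q m (by omega)).mp hqdvd
          rw [hrad] at hdvd
          have := ((prod_primes_dvd_iff S hSprime (x - 1)).mp hdvd) q hqS
          simpa [PySem.Int.mod_eq_zero_iff_dvd] using this
    -- both lists are strictly increasing with the same members, hence equal
    have hpw1 : List.Pairwise (· < ·)
        ((PySem.List.pyRange 1 m 1).filter
          (fun a => factors.all (fun factor => PySem.Int.mod (a - 1) factor == 0))) :=
      List.Pairwise.filter _ (PySem.List.pairwise_lt_pyRange_one 1 m)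
    have hpw2 : List.Pairwise (· < ·) (PySem.List.pyRange 1 m rad) := by
      rw [PySem.List.pyRange_of_pos 1 m hradpos]
      refine List.Pairwise.map _ ?_ List.pairwise_lt_range
      intro a b hab
      have : rad * (a : Int) < rad * (b : Int) := by
        apply mul_lt_mul_of_pos_left _ hradpos
        exact_mod_cast hab
      omega
    have hperm := (List.perm_ext_iff_of_nodup
      (hpw1.imp ne_of_lt) (hpw2.imp ne_of_lt)).mpr hmem
    exact List.Perm.eq_of_pairwise (fun a b _ _ h1 h2 => by omega) hpw1 hpw2 hperm
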